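-- pv_equiv track=rewrite | github.com/mraissi-capg/stellantis-demo | src/module_b/script_module_b.py | complex_function
-- ===== SOURCE A (Python) =====
-- def complex_function(x):  # noqa
--     result = 0
--     for i in range(x):
--         for j in range(i):
--             for k in range(j):
--                 if i + j + k > x:
--                     result += i * j * k
--                 else:
--                     result -= i * j * k
--     return result
-- ===== SOURCE B (Python) =====
-- def complex_function(x):
--     result = 0
--     for i in range(x):
--         for j in range(i):
--             t = x - i - j
--             total = j * (j - 1) // 2                      # sum of k over range(j)
--             m = min(t, j - 1)
--             neg = m * (m + 1) // 2 if m >= 0 else 0       # sum of k in range(j) with i+j+k <= x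
--             result += i * j * (total - 2 * neg)
--     return result
-- ===== Notes on version B (the rewrite author's own statement) =====
-- stated objective: faster
-- what changed: The innermost k-loop is replaced by a closed-form signed partial sum (triangular numbers split at the threshold k = x-i-j), dropping one nesting level.
import Mathlib
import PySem

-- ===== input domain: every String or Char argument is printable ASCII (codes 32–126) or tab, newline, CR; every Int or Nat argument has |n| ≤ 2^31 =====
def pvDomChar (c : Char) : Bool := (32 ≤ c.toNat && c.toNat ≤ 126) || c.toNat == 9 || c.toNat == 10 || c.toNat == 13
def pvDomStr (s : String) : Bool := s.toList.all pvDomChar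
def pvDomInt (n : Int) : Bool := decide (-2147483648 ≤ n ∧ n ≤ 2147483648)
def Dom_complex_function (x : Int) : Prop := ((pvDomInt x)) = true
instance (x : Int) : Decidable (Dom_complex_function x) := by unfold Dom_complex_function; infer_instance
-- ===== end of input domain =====

-- B replaces the innermost k-loop by a closed-form signed partial sum (objective: faster, asymptotic).

-- ===== PORT A =====
def complex_function (x : Int) : Int :=
  (PySem.List.pyRange 0 x 1).foldl (fun result i =>
    (PySem.List.pyRange 0 i 1).foldl (fun result j =>
      (PySem.List.pyRange 0 j 1).foldl (fun result k =>
        if i + j + k > x then result + i * j * k else result - i * j * k) result) result) 0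

-- ===== PORT B =====
def complex_function_alt (x : Int) : Int :=
  (PySem.List.pyRange 0 x 1).foldl (fun result i =>
    (PySem.List.pyRange 0 i 1).foldl (fun result j =>
      let t := x - i - j
      let total := PySem.Int.floordiv (j * (j - 1)) 2
      let m := min t (j - 1)
      let neg := if 0 ≤ m then PySem.Int.floordiv (m * (m + 1)) 2 else 0
      result + i * j * (total - 2 * neg)) result) 0

-- ===== PRECONDITION & SPEC =====
def Spec_complex_function (x : Int) (out : Int) : Prop := out = complex_function_alt x
instance (x : Int) (out : Int) : Decidable (Spec_complex_function x out) := by unfold Spec_complex_function; infer_instance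

-- ===== CLAIM (what is proved, stated in full; the proofs are below) =====
def Claim_equal_complex_function : Prop := ∀ (x : Int), Dom_complex_function x → Spec_complex_function x (complex_function x)

-- ===== LEMMAS AND PROOFS =====

-- signed sum of k over range(n): +k when i+j+k > x, else -k
def pvSsum (x i j : Int) : Nat → Int
  | 0 => 0
  | n + 1 => pvSsum x i j n + (if i + j + (n : Int) > x then (n : Int) else -(n : Int))

theorem pvKfold (x i j : Int) (n : Nat) (r : Int) :
    (PySem.List.pyRange 0 (n : Int) 1).foldl (fun result k =>
      if i + j + k > x then result + i * j * k else result - i * j * k) r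
      = r + i * j * pvSsum x i j n := by
  induction n generalizing r with
  | zero => simp [PySem.List.pyRange_one_eq_nil (by omega : (0:Int) ≤ 0), pvSsum]
  | succ n ih =>
    rw [show ((n + 1 : Nat) : Int) = (n : Int) + 1 by push_cast; ring,
      PySem.List.pyRange_one_succ_right (by positivity), List.foldl_append, ih]
    simp only [List.foldl_cons, List.foldl_nil, pvSsum]
    split <;> ring

theorem pvSsum_closed (x i j : Int) (n : Nat) :
    2 * pvSsum x i j n =
      (n : Int) * ((n : Int) - 1) -
        2 * (if 0 ≤ min (x - i - j) ((n : Int) - 1)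
              then min (x - i - j) ((n : Int) - 1) * (min (x - i - j) ((n : Int) - 1) + 1)
              else 0) := by
  induction n with
  | zero =>
    have h0 : min (x - i - j) (((0 : Nat) : Int) - 1) ≤ -1 := by
      have := min_le_right (x - i - j) (((0 : Nat) : Int) - 1)
      omega
    rw [if_neg (by omega)]
    simp [pvSsum]
  | succ n ih =>
    simp only [pvSsum]
    push_cast
    by_cases hc : i + j + (n : Int) > x
    · have hmin : min (x - i - j) ((n : Int) + 1 - 1) = min (x - i - j) ((n : Int) - 1) := by
        rw [min_eq_left (by omega), min_eq_left (by omega)]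
      rw [if_pos hc, hmin]
      linear_combination ih
    · have hge : (n : Int) ≤ x - i - j := by omega
      have h1 : min (x - i - j) ((n : Int) + 1 - 1) = (n : Int) := by
        rw [show (n : Int) + 1 - 1 = (n : Int) by ring, min_eq_right hge]
      have h2 : (if 0 ≤ min (x - i - j) ((n : Int) - 1)
          then min (x - i - j) ((n : Int) - 1) * (min (x - i - j) ((n : Int) - 1) + 1) else 0)
          = ((n : Int) - 1) * (n : Int) := by
        rcases Nat.eq_zero_or_pos n with h | h
        · subst h
          simp only [Nat.cast_zero]
          rw [if_neg (by have := min_le_right (x - i - j) ((0:Int) - 1); omega)]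
          norm_num
        · have hn1 : (1 : Int) ≤ (n : Int) := by exact_mod_cast h
          rw [min_eq_right (by omega), if_pos (by omega)]
          ring
      rw [if_neg hc, h1, if_pos (by positivity : (0:Int) ≤ (n : Int))]
      rw [h2] at ih
      linear_combination ih

theorem pvInner (x i j : Int) (hj : 0 ≤ j) (r : Int) :
    (PySem.List.pyRange 0 j 1).foldl (fun result k =>
      if i + j + k > x then result + i * j * k else result - i * j * k) r
      = (let t := x - i - j
         let total := PySem.Int.floordiv (j * (j - 1)) 2
         let m := min t (j - 1)
         let neg := if 0 ≤ m then PySem.Int.floordiv (m * (m + 1)) 2 else 0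
         r + i * j * (total - 2 * neg)) := by
  have hjn : ((j.toNat : Int)) = j := Int.toNat_of_nonneg hj
  have h1 := pvKfold x i j j.toNat r
  rw [hjn] at h1
  rw [h1]
  have h2 := pvSsum_closed x i j j.toNat
  rw [hjn] at h2
  simp only []
  set t := x - i - j with ht
  set m := min t (j - 1) with hm
  -- evenness of the two triangular products
  obtain ⟨c, hc⟩ : Even (j * (j - 1)) := by
    have := Int.even_mul_succ_self (j - 1)
    simpa [mul_comm, sub_add_cancel] using this
  obtain ⟨d, hd⟩ : Even (m * (m + 1)) := Int.even_mul_succ_self m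
  have htot : PySem.Int.floordiv (j * (j - 1)) 2 = c := by
    rw [PySem.Int.floordiv_eq_ediv_of_pos (by omega)]; omega
  have hneg : PySem.Int.floordiv (m * (m + 1)) 2 = d := by
    rw [PySem.Int.floordiv_eq_ediv_of_pos (by omega)]; omega
  rw [htot, hneg]
  have hssum : pvSsum x i j j.toNat = c - 2 * (if 0 ≤ m then d else 0) := by
    by_cases hm0 : 0 ≤ m
    · rw [if_pos hm0] at h2 ⊢; omega
    · rw [if_neg hm0] at h2 ⊢; omega
  rw [hssum]

-- ===== VERDICT (by name: the statement is the Claim_ definition above) =====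
theorem complex_function_spec : Claim_equal_complex_function := by
  intro x _
  unfold Spec_complex_function complex_function complex_function_alt
  apply PySem.List.foldl_congr_mem
  intro acc i _
  apply PySem.List.foldl_congr_mem
  intro r j hj
  have hj0 : 0 ≤ j := ((PySem.List.mem_pyRange_one).mp hj).1
  exact pvInner x i j hj0 r
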